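-- pv_equiv track=rewrite | github.com/rosie-yoon/foundstudio | app.py | clean_lyrics_output
-- ===== SOURCE A (Python) =====
-- def clean_lyrics_output(raw_lyrics):
--     """AI가 생성한 가사에서 메타데이터 제거"""
--     if not raw_lyrics:
--         return ""
--
--     lines = raw_lyrics.strip().split('\n')
--     cleaned_lines = []
--     lyrics_started = False
--
--     for line in lines:
--         stripped_line = line.strip()
--
--         if not stripped_line:
--             if lyrics_started:
--                 cleaned_lines.append(line)
--             continue
--
--         lower_line = stripped_line.lower()
--         if any(lower_line.startswith(prefix) for prefix in [
--             'title:', 'theme:', 'theme description:', 'concept:',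
--             'style:', 'mood:', 'genre:', 'description:', 'song:', 'track:'
--         ]):
--             continue
--
--         if stripped_line.startswith('[') and any(tag in lower_line for tag in [
--             'verse', 'chorus', 'pre-chorus', 'bridge', 'intro', 'outro', 'final', 'hook'
--         ]):
--             lyrics_started = True
--
--         if lyrics_started:
--             cleaned_lines.append(line)
--
--     if not cleaned_lines:
--         return raw_lyrics.strip()
--
--     return '\n'.join(cleaned_lines).strip()
-- ===== SOURCE B (Python) =====
-- def clean_lyrics_output(raw_lyrics):
--     """AI가 생성한 가사에서 메타데이터 제거 (find-the-start-then-filter decomposition)"""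
--     if not raw_lyrics:
--         return ""
--
--     lines = raw_lyrics.strip().split('\n')
--
--     tags = ('verse', 'chorus', 'pre-chorus', 'bridge', 'intro', 'outro', 'final', 'hook')
--     prefixes = ('title:', 'theme:', 'theme description:', 'concept:',
--                 'style:', 'mood:', 'genre:', 'description:', 'song:', 'track:')
--
--     def is_start(line):
--         s = line.strip()
--         return s.startswith('[') and any(t in s.lower() for t in tags)
--
--     def is_meta(line):
--         low = line.strip().lower()
--         return any(low.startswith(p) for p in prefixes)
--
--     start = next((i for i, l in enumerate(lines) if is_start(l)), None)
--     if start is None: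
--         return raw_lyrics.strip()
--
--     kept = [l for l in lines[start:] if not l.strip() or not is_meta(l)]
--     return '\n'.join(kept).strip()
-- ===== Notes on version B (the rewrite author's own statement) =====
-- stated objective: simpler
-- what changed: Replaces the stateful lyrics_started flag loop with a stateless two-step decomposition: find the index of the first section-header line, then keep the tail of the lines filtered by a single comprehension.
import Mathlib
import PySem

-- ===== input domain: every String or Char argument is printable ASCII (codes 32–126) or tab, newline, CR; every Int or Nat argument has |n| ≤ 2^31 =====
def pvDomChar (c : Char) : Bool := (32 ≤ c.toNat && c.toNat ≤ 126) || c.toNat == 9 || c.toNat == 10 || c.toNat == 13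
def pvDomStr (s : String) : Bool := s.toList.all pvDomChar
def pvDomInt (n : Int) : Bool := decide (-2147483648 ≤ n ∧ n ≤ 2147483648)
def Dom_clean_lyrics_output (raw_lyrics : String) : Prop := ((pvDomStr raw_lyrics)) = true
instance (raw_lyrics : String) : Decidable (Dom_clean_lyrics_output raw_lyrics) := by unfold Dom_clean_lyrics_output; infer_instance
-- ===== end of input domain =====

-- B replaces A's stateful lyrics_started flag loop with a stateless find-the-first-section-header-then-filter decomposition (objective: simpler).


-- shared literal data of both Pythons
def pvMetaPrefixes : List String :=
  ["title:", "theme:", "theme description:", "concept:",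
   "style:", "mood:", "genre:", "description:", "song:", "track:"]

def pvTags : List String :=
  ["verse", "chorus", "pre-chorus", "bridge", "intro", "outro", "final", "hook"]

-- any(lower_line.startswith(prefix) for prefix in [...])  (lower_line = line.strip().lower())
def pvIsMetaLine (line : String) : Bool :=
  pvMetaPrefixes.any (fun p => PySem.Str.startswith (PySem.Str.lower (PySem.Str.strip line)) p)

-- stripped_line.startswith('[') and any(tag in lower_line for tag in [...])
def pvIsStart (line : String) : Bool :=
  let s := PySem.Str.strip line
  PySem.Str.startswith s "[" && pvTags.any (fun t => PySem.Str.isIn t (PySem.Str.lower s))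

-- ===== PORT A =====
-- A's loop body over the state (cleaned_lines, lyrics_started)
def pvStepA (st : List String × Bool) (line : String) : List String × Bool :=
  let stripped := PySem.Str.strip line
  if stripped = "" then
    if st.2 then (st.1 ++ [line], st.2) else st
  else if pvIsMetaLine line then st
  else
    let started := st.2 || pvIsStart line
    if started then (st.1 ++ [line], started) else (st.1, started)

def clean_lyrics_output (raw_lyrics : String) : String :=
  if raw_lyrics = "" then ""
  else
    let lines := (PySem.Str.split? (PySem.Str.strip raw_lyrics) "\n").getD []
    let res := lines.foldl pvStepA ([], false)
    if res.1 = [] then PySem.Str.strip raw_lyrics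
    else PySem.Str.strip (PySem.Str.join "\n" res.1)

-- ===== PORT B =====
-- keep line unless it is non-blank and metadata-prefixed
def pvKeep (line : String) : Bool :=
  PySem.Str.strip line == "" || !pvIsMetaLine line

def clean_lyrics_output_alt (raw_lyrics : String) : String :=
  if raw_lyrics = "" then ""
  else
    let lines := (PySem.Str.split? (PySem.Str.strip raw_lyrics) "\n").getD []
    match lines.findIdx? pvIsStart with
    | none => PySem.Str.strip raw_lyrics
    | some i => PySem.Str.strip (PySem.Str.join "\n" ((lines.drop i).filter pvKeep))

-- ===== PRECONDITION & SPEC =====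
def Spec_clean_lyrics_output (raw_lyrics : String) (out : String) : Prop := out = clean_lyrics_output_alt raw_lyrics
instance (raw_lyrics : String) (out : String) : Decidable (Spec_clean_lyrics_output raw_lyrics out) := by unfold Spec_clean_lyrics_output; infer_instance

-- ===== CLAIM (what is proved, stated in full; the proofs are below) =====
def Claim_equal_clean_lyrics_output : Prop := ∀ (raw_lyrics : String), Dom_clean_lyrics_output raw_lyrics → Spec_clean_lyrics_output raw_lyrics (clean_lyrics_output raw_lyrics)

-- ===== LEMMAS AND PROOFS =====

-- a line whose stripped form starts with '[' is non-blank
theorem bracket_head (l : String)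
    (h : PySem.Str.startswith (PySem.Str.strip l) "[" = true) :
    ∃ t, (PySem.Str.strip l).toList = '[' :: t := by
  simp [PySem.Chars.startswith_iff] at h
  obtain ⟨t, ht⟩ := h
  exact ⟨t, by rw [PySem.Str.toList_strip, ← ht]; rfl⟩

theorem strip_ne_empty_of_bracket (l : String)
    (h : PySem.Str.startswith (PySem.Str.strip l) "[" = true) :
    PySem.Str.strip l ≠ "" := by
  obtain ⟨t, ht⟩ := bracket_head l h
  intro he
  rw [he] at ht
  simp at ht

theorem not_meta_of_bracket (l : String)
    (h : PySem.Str.startswith (PySem.Str.strip l) "[" = true) :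
    pvIsMetaLine l = false := by
  obtain ⟨t, ht⟩ := bracket_head l h
  have hlc : PySem.Chars.lower ('[' :: t) = '[' :: PySem.Chars.lower t := rfl
  simp only [pvIsMetaLine, pvMetaPrefixes, PySem.Str.startswith_eq, PySem.Str.toList_lower,
    PySem.Str.toList_strip] at *
  rw [ht, hlc]
  simp only [List.any_cons, List.any_nil, Bool.or_eq_false_iff]
  and_intros <;> trivial

theorem keep_of_start (l : String) (h : pvIsStart l = true) : pvKeep l = true := by
  simp only [pvIsStart, Bool.and_eq_true] at h
  simp [pvKeep, not_meta_of_bracket l h.1]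

-- before the first section header the state never changes
theorem foldl_stepA_no_start (ls : List String) (acc : List String)
    (h : ∀ l ∈ ls, pvIsStart l = false) :
    ls.foldl pvStepA (acc, false) = (acc, false) := by
  induction ls generalizing acc with
  | nil => rfl
  | cons l rest ih =>
    have hl : pvIsStart l = false := h l (by simp)
    have hrest : ∀ x ∈ rest, pvIsStart x = false := fun x hx => h x (by simp [hx])
    simp only [List.foldl_cons, pvStepA, hl]
    split_ifs <;> simp_all [ih _ hrest]

-- once started, A appends exactly the pvKeep-filtered lines
theorem foldl_stepA_started (ls : List String) (acc : List String) :
    ls.foldl pvStepA (acc, true) = (acc ++ ls.filter pvKeep, true) := by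
  induction ls generalizing acc with
  | nil => simp
  | cons l rest ih =>
    by_cases hb : PySem.Str.strip l = ""
    · simp [List.foldl_cons, pvStepA, hb, pvKeep, ih]
    · by_cases hm : pvIsMetaLine l = true
      · simp [List.foldl_cons, pvStepA, hb, hm, pvKeep, ih]
      · simp only [Bool.not_eq_true] at hm
        simp [List.foldl_cons, pvStepA, hb, hm, pvKeep, ih]

-- the full characterisation of A's loop via B's find-then-filter
theorem foldl_stepA_found (ls : List String) (acc : List String) (i : Nat)
    (h : ls.findIdx? pvIsStart = some i) :
    ls.foldl pvStepA (acc, false) = (acc ++ (ls.drop i).filter pvKeep, true) := by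
  induction ls generalizing acc i with
  | nil => simp at h
  | cons l rest ih =>
    rw [List.findIdx?_cons] at h
    by_cases hs : pvIsStart l = true
    · rw [if_pos hs] at h
      obtain rfl : i = 0 := by simpa using h.symm
      have hs' := hs
      simp only [pvIsStart, Bool.and_eq_true] at hs'
      have hne := strip_ne_empty_of_bracket l hs'.1
      have hnm := not_meta_of_bracket l hs'.1
      have hstep : pvStepA (acc, false) l = (acc ++ [l], true) := by
        simp [pvStepA, hne, hnm, hs]
      rw [List.foldl_cons, hstep, foldl_stepA_started]
      simp [keep_of_start l hs]
    · rw [if_neg hs] at h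
      obtain ⟨j, hj, rfl⟩ := Option.map_eq_some_iff.mp h
      simp only [Bool.not_eq_true] at hs
      have hstep : pvStepA (acc, false) l = (acc, false) := by
        simp only [pvStepA, hs, Bool.or_false]
        split_ifs <;> simp_all
      rw [List.foldl_cons, hstep, ih acc j hj]
      simp

-- ===== VERDICT (by name: the statement is the Claim_ definition above) =====
theorem clean_lyrics_output_spec : Claim_equal_clean_lyrics_output := by
  intro raw _
  unfold Spec_clean_lyrics_output clean_lyrics_output clean_lyrics_output_alt
  by_cases hr : raw = ""
  · simp [hr]
  · rw [if_neg hr, if_neg hr]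
    set lines := (PySem.Str.split? (PySem.Str.strip raw) "\n").getD [] with hlines
    cases hfi : lines.findIdx? pvIsStart with
    | none =>
      have := foldl_stepA_no_start lines [] (List.findIdx?_eq_none_iff.mp hfi)
      simp [this, hfi]
    | some i =>
      have hres := foldl_stepA_found lines [] i hfi
      have hi : i < lines.length := (List.findIdx?_eq_some_iff_findIdx_eq.mp hfi).1
      have hgs : pvIsStart lines[i] = true := List.findIdx?_eq_some_iff_getElem.mp hfi |>.2.1
      have hdrop : lines.drop i = lines[i] :: lines.drop (i + 1) := List.drop_eq_getElem_cons hi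
      have hne : (lines.drop i).filter pvKeep ≠ [] := by
        rw [hdrop, List.filter_cons, keep_of_start _ hgs]
        simp
      simp [hres, hne, hfi]
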